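-- pv_equiv track=rewrite | github.com/leeyirie/Algorithm | 백준/Bronze/1284. 집 주소/집 주소.py | calculate_width
-- ===== SOURCE A (Python) =====
-- def calculate_width(number):
--     width = 0
--     for digit in number:
--         if digit == '1':
--             width += 2
--         elif digit == '0':
--             width += 4
--         else:
--             width += 3
--     # 각 숫자 사이에는 1cm의 여백이 들어가야하므로, 숫자의 개수 - 1 만큼의 여백 추가
--     width += len(number) - 1
--     # 호수판의 경계에는 1cm의 여백이 들어가야하므로, 왼쪽과 오른쪽 경계에 각각 1cm의 여백 추가
--     width += 2
--     return width
-- ===== SOURCE B (Python) =====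
-- def calculate_width(number):
--     n = len(number)
--     return 4 * n + number.count('0') - number.count('1') + 1
-- ===== Notes on version B (the rewrite author's own statement) =====
-- stated objective: simpler
-- what changed: Replaces the per-digit branching loop with a closed-form arithmetic expression 4*len(number) + number.count('0') - number.count('1') + 1, tallying only the two special digits via str.count.
import Mathlib
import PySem

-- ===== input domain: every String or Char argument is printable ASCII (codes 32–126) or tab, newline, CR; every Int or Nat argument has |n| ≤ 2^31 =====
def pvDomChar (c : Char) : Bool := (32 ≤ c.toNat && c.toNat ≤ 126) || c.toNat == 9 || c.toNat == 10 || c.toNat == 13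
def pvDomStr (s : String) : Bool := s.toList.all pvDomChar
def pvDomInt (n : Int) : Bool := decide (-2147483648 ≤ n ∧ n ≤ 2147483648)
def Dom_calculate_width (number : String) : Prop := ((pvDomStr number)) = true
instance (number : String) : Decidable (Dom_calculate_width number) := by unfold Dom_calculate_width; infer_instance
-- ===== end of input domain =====

-- B computes the same width by the closed form 4*len + count('0') - count('1') + 1 (simpler: no per-digit loop).

-- ===== PORT A =====
def calculate_width (number : String) : Int :=
  let width : Int := 0
  let width := number.toList.foldl
    (fun w digit => if digit = '1' then w + 2 else if digit = '0' then w + 4 else w + 3) width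
  let width := width + (PySem.Str.len number - 1)
  let width := width + 2
  width

-- ===== PORT B =====
def calculate_width_alt (number : String) : Int :=
  let n : Int := PySem.Str.len number
  4 * n + (PySem.Str.count number "0" : Int) - (PySem.Str.count number "1" : Int) + 1

-- ===== PRECONDITION & SPEC =====
def Spec_calculate_width (number : String) (out : Int) : Prop := out = calculate_width_alt number
instance (number : String) (out : Int) : Decidable (Spec_calculate_width number out) := by unfold Spec_calculate_width; infer_instance

-- ===== CLAIM (what is proved, stated in full; the proofs are below) =====
def Claim_equal_calculate_width : Prop := ∀ (number : String), Dom_calculate_width number → Spec_calculate_width number (calculate_width number)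

-- ===== LEMMAS AND PROOFS =====

-- Python's str.count with a single-character needle is List.count on the characters.
theorem chars_count_go_singleton (c : Char) (l : List Char) (fuel acc : Nat)
    (h : l.length ≤ fuel) :
    PySem.Chars.count.go [c] fuel l acc = acc + l.count c := by
  induction l generalizing fuel acc with
  | nil => cases fuel <;> simp [PySem.Chars.count.go]
  | cons d t ih =>
    cases fuel with
    | zero => simp at h
    | succ f =>
      simp only [List.length_cons, Nat.succ_le_succ_iff] at h
      by_cases hd : d = c
      · subst hd
        simp [PySem.Chars.count.go, List.isPrefixOf, ih f _ h]
        omega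
      · simp [PySem.Chars.count.go, List.isPrefixOf, hd, ih f _ h, Ne.symm hd]

theorem chars_count_singleton (c : Char) (l : List Char) :
    PySem.Chars.count l [c] = l.count c := by
  simp [PySem.Chars.count, chars_count_go_singleton c l l.length 0 le_rfl]

theorem foldl_width (l : List Char) (w : Int) :
    l.foldl (fun w digit => if digit = '1' then w + 2 else if digit = '0' then w + 4 else w + 3) w
      = w + 3 * l.length + l.count '0' - l.count '1' := by
  induction l generalizing w with
  | nil => simp
  | cons d t ih =>
    simp only [List.foldl_cons, ih, List.length_cons, List.count_cons]
    by_cases h1 : d = '1'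
    · simp [h1]; ring
    · by_cases h0 : d = '0'
      · subst h0; simp [h1]; ring
      · simp [h1, h0]; ring

-- ===== VERDICT (by name: the statement is the Claim_ definition above) =====
theorem calculate_width_spec : Claim_equal_calculate_width := by
  intro number _
  unfold Spec_calculate_width calculate_width calculate_width_alt
  simp only [foldl_width, PySem.Str.count, PySem.Str.len]
  have : ("0" : String).toList = ['0'] := rfl
  have : ("1" : String).toList = ['1'] := rfl
  simp_all [chars_count_singleton]
  ring
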